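-- pv_equiv track=rewrite | github.com/yeon-hong/coding-test | 프로그래머스/1/17681. ［1차］ 비밀지도/［1차］ 비밀지도.py | solution
-- ===== SOURCE A (Python) =====
-- def solution(n, arr1, arr2):
--     answer = []
--
--     for i, j in zip(arr1, arr2):
--         a = format(i | j, f'0{n}b')
--         b = ""
--         for k in a:
--             b += "#" if k == "1" else " "
--         answer.append(b)
--
--     return answer
-- ===== SOURCE B (Python) =====
-- def solution(n, arr1, arr2):
--     def row(v):
--         return "" if v == 0 else row(v >> 1) + ("#" if v & 1 else " ")
--     return [row(i | j).rjust(n) for i, j in zip(arr1, arr2)]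
-- ===== Notes on version B (the rewrite author's own statement) =====
-- stated objective: simpler
-- what changed: Replaces format(i|j,'0{n}b') plus a character-accumulating scan with a recursive shift/mask construction of each row (row(v>>1) + bit character) padded via str.rjust; Pre_ excludes negative entries (B's recursion never terminates there, A returns an artefact of format's '-' char) and non-positive widths n (A raises ValueError for n<0, and for n=0 format's minimum-one-digit ' ' on a zero row is a corner nobody specifies).
-- outside the precondition, e.g. on solution(0, [0], [0]): A returns [' '], B returns ['']; on solution(5, [-1], [0]): A returns ['    #'], B raises RecursionError
import Mathlib
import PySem

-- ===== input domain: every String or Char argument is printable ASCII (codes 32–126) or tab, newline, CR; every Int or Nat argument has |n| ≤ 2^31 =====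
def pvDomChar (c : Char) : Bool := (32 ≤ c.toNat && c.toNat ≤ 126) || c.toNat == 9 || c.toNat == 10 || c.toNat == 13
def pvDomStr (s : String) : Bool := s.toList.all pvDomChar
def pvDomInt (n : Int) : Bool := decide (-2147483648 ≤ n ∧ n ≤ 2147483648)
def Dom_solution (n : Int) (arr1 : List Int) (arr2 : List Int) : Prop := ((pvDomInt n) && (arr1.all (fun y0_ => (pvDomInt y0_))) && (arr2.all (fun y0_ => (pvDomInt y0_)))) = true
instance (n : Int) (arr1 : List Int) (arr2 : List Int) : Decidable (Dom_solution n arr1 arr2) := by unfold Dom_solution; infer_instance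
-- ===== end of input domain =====

-- B builds each row by a recursive shift/mask bit extraction padded with rjust, instead of A's format()+character-scan; objective: simpler.


-- ===== PORT A =====
-- binary digits of v, MSB first ([] for 0; format's minimum one digit is handled in pvFormatRowA)
def pvBinA (v : Nat) : List Char :=
  if v = 0 then [] else pvBinA (v / 2) ++ [if v % 2 = 1 then '1' else '0']
decreasing_by exact Nat.div_lt_self (Nat.pos_of_ne_zero (by assumption)) (by norm_num)

-- a = format(i | j, f'0{n}b'); b = ""; for k in a: b += '#' if k == '1' else ' '
-- (exact for n ≥ 1, which Pre_solution guarantees when rows exist: sign first, then zero fill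
--  to total width n, then the binary digits of |v|; strings handled as their char lists)
def pvFormatRowA (n : Int) (v : Int) : String :=
  let digits := if v = 0 then ['0'] else pvBinA v.natAbs
  let a := if v < 0 then '-' :: (List.replicate (n.toNat - (digits.length + 1)) '0' ++ digits)
           else List.replicate (n.toNat - digits.length) '0' ++ digits
  String.ofList (a.foldl (fun b k => b ++ [if k = '1' then '#' else ' ']) [])

def solution (n : Int) (arr1 : List Int) (arr2 : List Int) : List String :=
  (List.zip arr1 arr2).foldl
    (fun answer p => answer ++ [pvFormatRowA n (Int.lor p.1 p.2)]) []

-- ===== PORT B =====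
-- def row(v): return "" if v == 0 else row(v >> 1) + ("#" if v & 1 else " ")
-- (exact for v ≥ 0, which Pre_solution guarantees: v >> 1 = v / 2, v & 1 = v % 2)
def pvRowB (v : Nat) : List Char :=
  if v = 0 then [] else pvRowB (v / 2) ++ [if v % 2 = 1 then '#' else ' ']
decreasing_by exact Nat.div_lt_self (Nat.pos_of_ne_zero (by assumption)) (by norm_num)

-- [row(i | j).rjust(n) for i, j in zip(arr1, arr2)]; rjust pads on the left with spaces
def solution_alt (n : Int) (arr1 : List Int) (arr2 : List Int) : List String :=
  (List.zip arr1 arr2).map (fun p =>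
    let r := pvRowB (Int.lor p.1 p.2).toNat
    String.ofList (List.replicate (n.toNat - r.length) ' ' ++ r))

-- ===== PRECONDITION & SPEC =====
-- Pre_ excludes: negative widths n with rows present (A's format raises ValueError); rows with a
-- negative entry (B's recursion does not terminate there, and A's value — format's '-' mapped to
-- a space — is an artefact nobody specifies); and n = 0 on a row whose entries are both 0, where
-- A's [' '] (format's minimum one digit) and B's [''] are equally defensible.
def Pre_solution (n : Int) (arr1 : List Int) (arr2 : List Int) : Prop :=
  (arr1 = [] ∨ arr2 = [] ∨ 0 ≤ n) ∧
    ∀ p ∈ List.zip arr1 arr2, 0 ≤ p.1 ∧ 0 ≤ p.2 ∧ (p.1 = 0 ∧ p.2 = 0 → 1 ≤ n)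
instance (n : Int) (arr1 : List Int) (arr2 : List Int) : Decidable (Pre_solution n arr1 arr2) := by
  unfold Pre_solution; infer_instance

def pvWitness_solution : Int × List Int × List Int := (5, [9, 20, 28, 18, 11], [30, 1, 21, 17, 28])

def Spec_solution (n : Int) (arr1 : List Int) (arr2 : List Int) (out : List String) : Prop := out = solution_alt n arr1 arr2
instance (n : Int) (arr1 : List Int) (arr2 : List Int) (out : List String) : Decidable (Spec_solution n arr1 arr2 out) := by unfold Spec_solution; infer_instance

-- ===== CLAIM (what is proved, stated in full; the proofs are below) =====
def Claim_equal_solution : Prop := ∀ (n : Int) (arr1 : List Int) (arr2 : List Int), Dom_solution n arr1 arr2 → Pre_solution n arr1 arr2 → Spec_solution n arr1 arr2 (solution n arr1 arr2)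

-- ===== LEMMAS AND PROOFS =====

def pvMapC (k : Char) : Char := if k = '1' then '#' else ' '

lemma pvBinA_map (v : Nat) : (pvBinA v).map pvMapC = pvRowB v := by
  induction v using Nat.strong_induction_on with
  | _ v ih =>
    by_cases h : v = 0
    · rw [pvBinA, pvRowB]; simp [h]
    · rw [pvBinA, pvRowB]
      simp only [h, if_false]
      rw [List.map_append, ih (v / 2) (Nat.div_lt_self (Nat.pos_of_ne_zero h) (by norm_num))]
      congr 1
      by_cases h2 : v % 2 = 1 <;> simp [h2, pvMapC]

lemma pvBinA_len (v : Nat) : (pvBinA v).length = (pvRowB v).length := by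
  have := congrArg List.length (pvBinA_map v); simpa using this

lemma pvRow_eq (n : Int) (m : Nat) (h : 1 ≤ n ∨ m ≠ 0) :
    pvFormatRowA n (m : Int) =
      String.ofList (List.replicate (n.toNat - (pvRowB m).length) ' ' ++ pvRowB m) := by
  unfold pvFormatRowA
  dsimp only
  rw [if_neg (by omega : ¬ (m : Int) < 0)]
  apply congrArg String.ofList
  rw [PySem.List.foldl_append_singleton_eq_map, List.nil_append,
    show (fun k => if k = '1' then '#' else ' ') = pvMapC from rfl]
  by_cases h0 : m = 0
  · subst h0
    have hn : 1 ≤ n := by rcases h with h | h; exacts [h, absurd rfl h]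
    have hb : pvRowB 0 = [] := by rw [pvRowB]; norm_num
    rw [show n.toNat = (n.toNat - 1) + 1 from by omega]
    simp [hb, pvMapC, List.replicate_succ']
  · rw [if_neg (by exact_mod_cast h0), show ((m : Int)).natAbs = m from Int.natAbs_natCast m,
      List.map_append, List.map_replicate, show pvMapC '0' = ' ' from by decide,
      pvBinA_map, pvBinA_len]

lemma pvFoldl_app {α : Type} (f : α → String) (l : List α) (acc : List String) :
    l.foldl (fun rows p => rows ++ [f p]) acc = acc ++ l.map f := by
  induction l generalizing acc with
  | nil => simp
  | cons h t ih => simp [ih]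

-- ===== VERDICT (by name: the statement is the Claim_ definition above) =====
theorem solution_spec : Claim_equal_solution := by
  intro n arr1 arr2 _ hpre
  unfold Spec_solution solution solution_alt
  rw [pvFoldl_app, List.nil_append]
  apply List.map_congr_left
  intro p hp
  obtain ⟨h1, h2, h3⟩ := hpre.2 p hp
  have hlor : Int.lor p.1 p.2 = ((p.1.toNat ||| p.2.toNat : Nat) : Int) := by
    conv_lhs => rw [(Int.toNat_of_nonneg h1).symm, (Int.toNat_of_nonneg h2).symm]
    rfl
  rw [hlor, Int.toNat_natCast]
  dsimp only
  apply pvRow_eq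
  by_cases hz : p.1.toNat ||| p.2.toNat = 0
  · left
    apply h3
    have ha := @Nat.left_le_or p.1.toNat p.2.toNat
    have hb := @Nat.right_le_or p.1.toNat p.2.toNat
    rw [hz] at ha hb
    constructor <;> omega
  · right; exact hz
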